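-- pv_equiv track=rewrite | github.com/nathan-builds/python_labs | labs109.py | bridge_hand_shorthand
-- ===== SOURCE A (Python) =====
-- def bridge_hand_shorthand(hand):
--     spades = []
--     hearts = []
--     diamonds = []
--     clubs = []
--     trial_dict = {'A': 0, 'K': 1, 'Q': 2, 'J': 3, 'x': 4, '-': 5}
--     strl = ''
--
--     for rank, suit in hand:
--         if suit == 'clubs':
--             if rank == "ace":
--                 clubs.append('A')
--             elif rank == 'king':
--                 clubs.append('K')
--             elif rank == 'queen':
--                 clubs.append('Q')
--             elif rank == 'jack':
--                 clubs.append('J')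
--             else:
--                 clubs.append('x')
--
--         elif suit == 'hearts':
--             if rank == "ace":
--                 hearts.append('A')
--             elif rank == 'king':
--                 hearts.append('K')
--             elif rank == 'queen':
--                 hearts.append('Q')
--             elif rank == 'jack':
--                 hearts.append('J')
--             else:
--                 hearts.append('x')
--
--         elif suit == 'spades':
--             if rank == "ace":
--                 spades.append('A')
--             elif rank == 'king':
--                 spades.append('K')
--             elif rank == 'queen':
--                 spades.append('Q')
--             elif rank == 'jack':
--                 spades.append('J')
--             else:
--                 spades.append('x')
--
--         elif suit == 'diamonds':
--             if rank == "ace":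
--                 diamonds.append('A')
--             elif rank == 'king':
--                 diamonds.append('K')
--             elif rank == 'queen':
--                 diamonds.append('Q')
--             elif rank == 'jack':
--                 diamonds.append('J')
--             else:
--                 diamonds.append('x')
--
--     if len(spades) == 0:
--         spades.append('-')
--
--     if len(hearts) == 0:
--         hearts.append('-')
--     if len(clubs) == 0:
--         clubs.append('-')
--     if len(diamonds) == 0:
--         diamonds.append('-')
--
--     sorted_spades = sorted(spades, key=lambda x: trial_dict[x])
--     sorted_hearts = sorted(hearts, key=lambda x: trial_dict[x])
--     sorted_clubs = sorted(clubs, key=lambda x: trial_dict[x])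
--     sorted_diamonds = sorted(diamonds, key=lambda x: trial_dict[x])
--
--     return strl.join(sorted_spades) + ' ' + strl.join(sorted_hearts) + ' ' + strl.join(
--         sorted_diamonds) + ' ' + strl.join(
--         sorted_clubs)
-- ===== SOURCE B (Python) =====
-- def bridge_hand_shorthand(hand):
--     # One pass: count cards per (suit, shorthand-char); then emit each suit's
--     # piece by walking the fixed priority alphabet 'AKQJx' (no sorting).
--     honors = {'ace': 'A', 'king': 'K', 'queen': 'Q', 'jack': 'J'}
--     cnt = {}
--     for rank, suit in hand:
--         if suit in ('spades', 'hearts', 'diamonds', 'clubs'):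
--             key = (suit, honors.get(rank, 'x'))
--             cnt[key] = cnt.get(key, 0) + 1
--     pieces = []
--     for suit in ('spades', 'hearts', 'diamonds', 'clubs'):
--         piece = ''.join(ch * cnt.get((suit, ch), 0) for ch in 'AKQJx')
--         pieces.append(piece or '-')
--     return ' '.join(pieces)
-- ===== Notes on version B (the rewrite author's own statement) =====
-- stated objective: simpler
-- what changed: Replaces the four per-suit append lists and four comparison sorts by a single counting pass over (suit, shorthand-char) pairs and a fixed-order emission over the priority alphabet 'AKQJx'.
import Mathlib
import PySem

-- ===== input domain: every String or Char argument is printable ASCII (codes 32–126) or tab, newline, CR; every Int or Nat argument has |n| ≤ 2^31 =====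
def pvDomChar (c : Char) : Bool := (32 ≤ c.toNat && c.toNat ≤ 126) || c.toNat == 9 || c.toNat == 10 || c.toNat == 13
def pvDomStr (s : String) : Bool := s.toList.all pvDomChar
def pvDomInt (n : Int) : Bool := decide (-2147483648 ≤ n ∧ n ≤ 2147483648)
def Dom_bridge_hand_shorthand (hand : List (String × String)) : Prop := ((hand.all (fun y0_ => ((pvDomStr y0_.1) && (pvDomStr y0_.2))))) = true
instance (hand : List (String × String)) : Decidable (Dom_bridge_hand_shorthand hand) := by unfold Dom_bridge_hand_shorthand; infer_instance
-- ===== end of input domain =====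

-- B replaces A's four per-suit lists + four comparison sorts by one counting pass and a
-- fixed-order emission over the priority alphabet "AKQJx" (objective: simpler).

-- ===== PORT A =====
-- the body of A's 'for rank, suit in hand' loop, carrying (spades, hearts, diamonds, clubs)
def pvStepA (st : List String × List String × List String × List String)
    (rs : String × String) : List String × List String × List String × List String :=
  if rs.2 == "clubs" then
    (st.1, st.2.1, st.2.2.1,
      st.2.2.2 ++ [if rs.1 == "ace" then "A" else if rs.1 == "king" then "K"
                   else if rs.1 == "queen" then "Q" else if rs.1 == "jack" then "J" else "x"])
  else if rs.2 == "hearts" then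
    (st.1,
      st.2.1 ++ [if rs.1 == "ace" then "A" else if rs.1 == "king" then "K"
                 else if rs.1 == "queen" then "Q" else if rs.1 == "jack" then "J" else "x"],
      st.2.2.1, st.2.2.2)
  else if rs.2 == "spades" then
    (st.1 ++ [if rs.1 == "ace" then "A" else if rs.1 == "king" then "K"
              else if rs.1 == "queen" then "Q" else if rs.1 == "jack" then "J" else "x"],
      st.2.1, st.2.2.1, st.2.2.2)
  else if rs.2 == "diamonds" then
    (st.1, st.2.1,
      st.2.2.1 ++ [if rs.1 == "ace" then "A" else if rs.1 == "king" then "K"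
                   else if rs.1 == "queen" then "Q" else if rs.1 == "jack" then "J" else "x"],
      st.2.2.2)
  else st

def bridge_hand_shorthand (hand : List (String × String)) : String :=
  let trial_dict : PySem.Dict String Int :=
    PySem.Dict.ofList [("A", 0), ("K", 1), ("Q", 2), ("J", 3), ("x", 4), ("-", 5)]
  let strl : String := ""
  let st := hand.foldl pvStepA ([], [], [], [])
  let spades := if st.1.length == 0 then st.1 ++ ["-"] else st.1
  let hearts := if st.2.1.length == 0 then st.2.1 ++ ["-"] else st.2.1
  let clubs := if st.2.2.2.length == 0 then st.2.2.2 ++ ["-"] else st.2.2.2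
  let diamonds := if st.2.2.1.length == 0 then st.2.2.1 ++ ["-"] else st.2.2.1
  -- key=lambda x: trial_dict[x]; every element is one of the dict's keys, so the
  -- KeyError branch is unreachable and getD's default is never used
  let sorted_spades := PySem.List.sorted spades (fun x => trial_dict.getD x 0)
  let sorted_hearts := PySem.List.sorted hearts (fun x => trial_dict.getD x 0)
  let sorted_clubs := PySem.List.sorted clubs (fun x => trial_dict.getD x 0)
  let sorted_diamonds := PySem.List.sorted diamonds (fun x => trial_dict.getD x 0)
  PySem.Str.join strl sorted_spades ++ " " ++ PySem.Str.join strl sorted_hearts ++ " " ++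
    PySem.Str.join strl sorted_diamonds ++ " " ++ PySem.Str.join strl sorted_clubs

-- ===== PORT B =====
-- the body of B's counting loop: cnt[(suit, honors.get(rank,'x'))] += 1 for known suits
def pvCountStepB (cnt : PySem.Dict (String × String) Int) (rs : String × String) :
    PySem.Dict (String × String) Int :=
  if ["spades", "hearts", "diamonds", "clubs"].contains rs.2 then
    cnt.insert (rs.2, (PySem.Dict.ofList [("ace", "A"), ("king", "K"), ("queen", "Q"), ("jack", "J")]).getD rs.1 "x")
      (cnt.getD (rs.2, (PySem.Dict.ofList [("ace", "A"), ("king", "K"), ("queen", "Q"), ("jack", "J")]).getD rs.1 "x") 0 + 1)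
  else cnt

-- one suit's piece: ''.join(ch * cnt.get((suit, ch), 0) for ch in 'AKQJx') or '-'
-- (ch * n for a count n ≥ 0 is exactly n copies of ch)
def pvPieceB (cnt : PySem.Dict (String × String) Int) (suit : String) : String :=
  let piece := PySem.Str.join ""
    (("AKQJx".toList).map (fun ch =>
      String.ofList (List.replicate (cnt.getD (suit, String.ofList [ch]) 0).toNat ch)))
  if piece == "" then "-" else piece

def bridge_hand_shorthand_alt (hand : List (String × String)) : String :=
  let cnt := hand.foldl pvCountStepB PySem.Dict.empty
  let pieces := (["spades", "hearts", "diamonds", "clubs"]).foldl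
    (fun pieces suit => pieces ++ [pvPieceB cnt suit]) []
  PySem.Str.join " " pieces

-- ===== PRECONDITION & SPEC =====
def Spec_bridge_hand_shorthand (hand : List (String × String)) (out : String) : Prop := out = bridge_hand_shorthand_alt hand
instance (hand : List (String × String)) (out : String) : Decidable (Spec_bridge_hand_shorthand hand out) := by unfold Spec_bridge_hand_shorthand; infer_instance

-- ===== CLAIM (what is proved, stated in full; the proofs are below) =====
def Claim_equal_bridge_hand_shorthand : Prop := ∀ (hand : List (String × String)), Dom_bridge_hand_shorthand hand → Spec_bridge_hand_shorthand hand (bridge_hand_shorthand hand)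

-- ===== LEMMAS AND PROOFS =====

-- the one-card shorthand character, and the per-suit card list A accumulates
def pvRC (rank : String) : String :=
  if rank == "ace" then "A" else if rank == "king" then "K"
  else if rank == "queen" then "Q" else if rank == "jack" then "J" else "x"

def pvSuitList (hand : List (String × String)) (suit : String) : List String :=
  (hand.filter (fun p => p.2 == suit)).map (fun p => pvRC p.1)

-- A's sort key
def pvKey (x : String) : Int :=
  (PySem.Dict.ofList [("A", 0), ("K", 1), ("Q", 2), ("J", 3), ("x", 4), ("-", 5)] :
    PySem.Dict String Int).getD x 0

-- the sorted shape: counts of A,K,Q,J,x,- emitted in priority order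
def pvCanon (a k q j x d : Nat) : List String :=
  List.replicate a "A" ++ List.replicate k "K" ++ List.replicate q "Q" ++
  List.replicate j "J" ++ List.replicate x "x" ++ List.replicate d "-"

theorem pvLoopA (hand : List (String × String)) :
    ∀ s h d c : List String,
      hand.foldl pvStepA (s, h, d, c) =
        (s ++ pvSuitList hand "spades", h ++ pvSuitList hand "hearts",
         d ++ pvSuitList hand "diamonds", c ++ pvSuitList hand "clubs") := by
  induction hand with
  | nil => intro s h d c; simp [pvSuitList]
  | cons y t ih =>
    intro s h d c
    simp only [List.foldl_cons]
    by_cases h1 : y.2 = "clubs"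
    · simp [pvStepA, pvSuitList, h1, ih, pvRC]
    · by_cases h2 : y.2 = "hearts"
      · simp [pvStepA, pvSuitList, h2, ih, pvRC]
      · by_cases h3 : y.2 = "spades"
        · simp [pvStepA, pvSuitList, h3, ih, pvRC]
        · by_cases h4 : y.2 = "diamonds"
          · simp [pvStepA, pvSuitList, h4, ih, pvRC]
          · simp [pvStepA, pvSuitList, h1, h2, h3, h4, ih]

theorem pvInsertMiddle (v : String) (pre suf : List String)
    (hpre : ∀ y ∈ pre, ¬ pvKey v < pvKey y) (hsuf : ∀ y ∈ suf, pvKey v < pvKey y) :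
    PySem.List.insertBy (fun a b => decide (pvKey a < pvKey b)) v (pre ++ suf) =
      pre ++ v :: suf := by
  induction pre with
  | nil =>
    cases suf with
    | nil => simp [PySem.List.insertBy]
    | cons y t => simp [PySem.List.insertBy, hsuf y (List.mem_cons_self)]
  | cons y t ih =>
    have hy : ¬ pvKey v < pvKey y := hpre y List.mem_cons_self
    simp only [List.cons_append, PySem.List.insertBy, decide_eq_true_eq, if_neg hy]
    exact congrArg (y :: ·) (ih (fun z hz => hpre z (List.mem_cons_of_mem _ hz)))

theorem pvInsA (a k q j x d : Nat) :
    PySem.List.insertBy (fun u w => decide (pvKey u < pvKey w)) "A" (pvCanon a k q j x d) =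
      pvCanon (a + 1) k q j x d := by
  have e : pvCanon a k q j x d = List.replicate a "A" ++
      (List.replicate k "K" ++ List.replicate q "Q" ++ List.replicate j "J" ++
       List.replicate x "x" ++ List.replicate d "-") := by
    simp [pvCanon, List.append_assoc]
  rw [e, pvInsertMiddle]
  · simp [pvCanon, List.replicate_succ', List.append_assoc]
  · intro z hz
    rw [List.eq_of_mem_replicate hz]; decide
  · intro z hz
    simp only [List.mem_append, List.mem_replicate] at hz
    rcases hz with (((⟨-, rfl⟩ | ⟨-, rfl⟩) | ⟨-, rfl⟩) | ⟨-, rfl⟩) | ⟨-, rfl⟩ <;> decide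

theorem pvInsK (a k q j x d : Nat) :
    PySem.List.insertBy (fun u w => decide (pvKey u < pvKey w)) "K" (pvCanon a k q j x d) =
      pvCanon a (k + 1) q j x d := by
  have e : pvCanon a k q j x d = (List.replicate a "A" ++ List.replicate k "K") ++
      (List.replicate q "Q" ++ List.replicate j "J" ++
       List.replicate x "x" ++ List.replicate d "-") := by
    simp [pvCanon, List.append_assoc]
  rw [e, pvInsertMiddle]
  · simp [pvCanon, List.replicate_succ', List.append_assoc]
  · intro z hz
    simp only [List.mem_append, List.mem_replicate] at hz
    rcases hz with ⟨-, rfl⟩ | ⟨-, rfl⟩ <;> decide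
  · intro z hz
    simp only [List.mem_append, List.mem_replicate] at hz
    rcases hz with ((⟨-, rfl⟩ | ⟨-, rfl⟩) | ⟨-, rfl⟩) | ⟨-, rfl⟩ <;> decide

theorem pvInsQ (a k q j x d : Nat) :
    PySem.List.insertBy (fun u w => decide (pvKey u < pvKey w)) "Q" (pvCanon a k q j x d) =
      pvCanon a k (q + 1) j x d := by
  have e : pvCanon a k q j x d = (List.replicate a "A" ++ List.replicate k "K" ++
      List.replicate q "Q") ++
      (List.replicate j "J" ++ List.replicate x "x" ++ List.replicate d "-") := by
    simp [pvCanon, List.append_assoc]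
  rw [e, pvInsertMiddle]
  · simp [pvCanon, List.replicate_succ', List.append_assoc]
  · intro z hz
    simp only [List.mem_append, List.mem_replicate] at hz
    rcases hz with (⟨-, rfl⟩ | ⟨-, rfl⟩) | ⟨-, rfl⟩ <;> decide
  · intro z hz
    simp only [List.mem_append, List.mem_replicate] at hz
    rcases hz with (⟨-, rfl⟩ | ⟨-, rfl⟩) | ⟨-, rfl⟩ <;> decide

theorem pvInsJ (a k q j x d : Nat) :
    PySem.List.insertBy (fun u w => decide (pvKey u < pvKey w)) "J" (pvCanon a k q j x d) =
      pvCanon a k q (j + 1) x d := by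
  have e : pvCanon a k q j x d = (List.replicate a "A" ++ List.replicate k "K" ++
      List.replicate q "Q" ++ List.replicate j "J") ++
      (List.replicate x "x" ++ List.replicate d "-") := by
    simp [pvCanon, List.append_assoc]
  rw [e, pvInsertMiddle]
  · simp [pvCanon, List.replicate_succ', List.append_assoc]
  · intro z hz
    simp only [List.mem_append, List.mem_replicate] at hz
    rcases hz with ((⟨-, rfl⟩ | ⟨-, rfl⟩) | ⟨-, rfl⟩) | ⟨-, rfl⟩ <;> decide
  · intro z hz
    simp only [List.mem_append, List.mem_replicate] at hz
    rcases hz with ⟨-, rfl⟩ | ⟨-, rfl⟩ <;> decide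

theorem pvInsX (a k q j x d : Nat) :
    PySem.List.insertBy (fun u w => decide (pvKey u < pvKey w)) "x" (pvCanon a k q j x d) =
      pvCanon a k q j (x + 1) d := by
  have e : pvCanon a k q j x d = (List.replicate a "A" ++ List.replicate k "K" ++
      List.replicate q "Q" ++ List.replicate j "J" ++ List.replicate x "x") ++
      List.replicate d "-" := by
    simp [pvCanon, List.append_assoc]
  rw [e, pvInsertMiddle]
  · simp [pvCanon, List.replicate_succ', List.append_assoc]
  · intro z hz
    simp only [List.mem_append, List.mem_replicate] at hz
    rcases hz with (((⟨-, rfl⟩ | ⟨-, rfl⟩) | ⟨-, rfl⟩) | ⟨-, rfl⟩) | ⟨-, rfl⟩ <;> decide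
  · intro z hz
    rw [List.eq_of_mem_replicate hz]; decide

theorem pvInsD (a k q j x d : Nat) :
    PySem.List.insertBy (fun u w => decide (pvKey u < pvKey w)) "-" (pvCanon a k q j x d) =
      pvCanon a k q j x (d + 1) := by
  have e : pvCanon a k q j x d = (List.replicate a "A" ++ List.replicate k "K" ++
      List.replicate q "Q" ++ List.replicate j "J" ++ List.replicate x "x" ++
      List.replicate d "-") ++ [] := by simp [pvCanon, List.append_assoc]
  rw [e, pvInsertMiddle]
  · simp [pvCanon, List.replicate_succ', List.append_assoc]
  · intro z hz
    simp only [List.mem_append, List.mem_replicate] at hz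
    rcases hz with ((((⟨-, rfl⟩ | ⟨-, rfl⟩) | ⟨-, rfl⟩) | ⟨-, rfl⟩) | ⟨-, rfl⟩) | ⟨-, rfl⟩ <;> decide
  · intro z hz
    exact absurd hz (List.not_mem_nil)

theorem pvFoldCanon (l : List String)
    (h : ∀ y ∈ l, y ∈ (["A", "K", "Q", "J", "x", "-"] : List String)) :
    ∀ a k q j x d : Nat,
      l.foldl (fun acc v => PySem.List.insertBy (fun u w => decide (pvKey u < pvKey w)) v acc)
        (pvCanon a k q j x d) =
      pvCanon (a + l.count "A") (k + l.count "K") (q + l.count "Q") (j + l.count "J")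
        (x + l.count "x") (d + l.count "-") := by
  induction l with
  | nil => intro a k q j x d; simp
  | cons y t ih =>
    intro a k q j x d
    have hy := h y List.mem_cons_self
    have ht := fun z hz => h z (List.mem_cons_of_mem _ hz)
    simp only [List.mem_cons, List.not_mem_nil, or_false] at hy
    rcases hy with rfl | rfl | rfl | rfl | rfl | rfl <;>
      simp only [List.foldl_cons, pvInsA, pvInsK, pvInsQ, pvInsJ, pvInsX, pvInsD, ih ht,
        List.count_cons] <;>
      norm_num <;> congr 1 <;> omega

theorem pvSortedCanon (l : List String)
    (h : ∀ y ∈ l, y ∈ (["A", "K", "Q", "J", "x", "-"] : List String)) :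
    PySem.List.sorted l pvKey =
      pvCanon (l.count "A") (l.count "K") (l.count "Q") (l.count "J")
        (l.count "x") (l.count "-") := by
  rw [PySem.List.sorted_eq_foldl_insertBy]
  have e : ([] : List String) = pvCanon 0 0 0 0 0 0 := by simp [pvCanon]
  rw [e, pvFoldCanon l h]
  simp

-- honors.get(rank, 'x') is the shorthand character
theorem pvHonors (rank : String) :
    (PySem.Dict.ofList [("ace", "A"), ("king", "K"), ("queen", "Q"), ("jack", "J")] :
      PySem.Dict String String).getD rank "x" = pvRC rank := by
  by_cases h1 : rank = "ace"
  · subst h1; rfl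
  by_cases h2 : rank = "king"
  · subst h2; rfl
  by_cases h3 : rank = "queen"
  · subst h3; rfl
  by_cases h4 : rank = "jack"
  · subst h4; rfl
  have hrc : pvRC rank = "x" := by simp [pvRC, h1, h2, h3, h4]
  rw [hrc]
  unfold PySem.Dict.ofList PySem.Dict.update PySem.Dict.getD
  simp [PySem.Dict.get?_insert, h1, h2, h3, h4]

theorem pvCountDictGen (k : String × String) (hand : List (String × String)) :
    ∀ d : PySem.Dict (String × String) Int,
      (hand.foldl pvCountStepB d).getD k 0 =
        d.getD k 0 +
          (((hand.filter (fun p => (["spades", "hearts", "diamonds", "clubs"] : List String).contains p.2)).map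
            (fun p => (p.2, pvRC p.1))).count k : Int) := by
  induction hand with
  | nil => intro d; simp
  | cons y t ih =>
    intro d
    simp only [List.foldl_cons, pvCountStepB]
    by_cases hcont : (["spades", "hearts", "diamonds", "clubs"] : List String).contains y.2
    · rw [if_pos hcont, ih, pvHonors, PySem.Dict.getD_insert,
        List.filter_cons_of_pos (p := fun q : String × String =>
          (["spades", "hearts", "diamonds", "clubs"] : List String).contains q.2) hcont,
        List.map_cons, List.count_cons]
      by_cases hk : k = (y.2, pvRC y.1)
      · subst hk
        simp only [BEq.rfl, if_true]
        push_cast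
        ring
      · rw [if_neg hk]
        have hb : ((y.2, pvRC y.1) == k) = false := by
          exact beq_eq_false_iff_ne.mpr (Ne.symm hk)
        rw [hb]
        simp
    · rw [if_neg hcont, ih, List.filter_cons_of_neg (p := fun q : String × String =>
        (["spades", "hearts", "diamonds", "clubs"] : List String).contains q.2) hcont]

theorem pvCountDict (hand : List (String × String)) (k : String × String) :
    (hand.foldl pvCountStepB PySem.Dict.empty).getD k 0 =
      (((hand.filter (fun p => (["spades", "hearts", "diamonds", "clubs"] : List String).contains p.2)).map
        (fun p => (p.2, pvRC p.1))).count k : Int) := by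
  simpa using pvCountDictGen k hand PySem.Dict.empty

theorem pvCountSuit (hand : List (String × String)) (suit c : String)
    (hs : suit ∈ (["spades", "hearts", "diamonds", "clubs"] : List String)) :
    ((hand.filter (fun p => (["spades", "hearts", "diamonds", "clubs"] : List String).contains p.2)).map
        (fun p => (p.2, pvRC p.1))).count (suit, c) =
      (pvSuitList hand suit).count c := by
  unfold pvSuitList
  rw [List.count_eq_countP, List.count_eq_countP, List.countP_map, List.countP_filter,
    List.countP_map, List.countP_filter]
  apply List.countP_congr
  intro p _
  have pb : ((p.2, pvRC p.1) == (suit, c)) = ((p.2 == suit) && (pvRC p.1 == c)) := rfl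
  simp only [Function.comp, pb]
  simp only [Bool.and_eq_true, beq_iff_eq, List.contains_eq_mem, decide_eq_true_eq]
  constructor
  · rintro ⟨⟨e1, e2⟩, -⟩; exact ⟨e2, e1⟩
  · rintro ⟨e2, e1⟩; exact ⟨⟨e1, e2⟩, e1 ▸ hs⟩

theorem pvLenEqSum (l : List String)
    (h : ∀ y ∈ l, y ∈ (["A", "K", "Q", "J", "x"] : List String)) :
    l.length = l.count "A" + l.count "K" + l.count "Q" + l.count "J" + l.count "x" := by
  induction l with
  | nil => simp
  | cons y t ih =>
    have hy := h y List.mem_cons_self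
    have ht := ih (fun z hz => h z (List.mem_cons_of_mem _ hz))
    simp only [List.mem_cons, List.not_mem_nil, or_false] at hy
    rcases hy with rfl | rfl | rfl | rfl | rfl <;> simp [ht] <;> omega

theorem pvJoinNilFlatten (ls : List (List Char)) : PySem.Chars.join [] ls = ls.flatten := by
  induction ls with
  | nil => simp
  | cons a rest ih =>
    cases rest with
    | nil => simp [PySem.Chars.join, List.intercalate]
    | cons b r => rw [PySem.Chars.join_cons_cons, ih]; simp

theorem pvJoinCanonToList (a k q j x d : Nat) :
    (PySem.Str.join "" (pvCanon a k q j x d)).toList =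
      List.replicate a 'A' ++ List.replicate k 'K' ++ List.replicate q 'Q' ++
      List.replicate j 'J' ++ List.replicate x 'x' ++ List.replicate d '-' := by
  rw [PySem.Str.toList_join, show ("" : String).toList = [] from rfl, pvJoinNilFlatten]
  simp [pvCanon, List.map_append, List.map_replicate, List.flatten_append,
    List.flatten_replicate_singleton, show ("A" : String).toList = ['A'] from rfl,
    show ("K" : String).toList = ['K'] from rfl, show ("Q" : String).toList = ['Q'] from rfl,
    show ("J" : String).toList = ['J'] from rfl, show ("x" : String).toList = ['x'] from rfl,
    show ("-" : String).toList = ['-'] from rfl, List.append_assoc]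

theorem pvRCmem (r : String) : pvRC r ∈ (["A", "K", "Q", "J", "x"] : List String) := by
  unfold pvRC; split_ifs <;> simp

-- one suit: A's dash-pad + sort + join equals B's piece, given matching counts
theorem pvPiece (l : List String)
    (h : ∀ y ∈ l, y ∈ (["A", "K", "Q", "J", "x"] : List String))
    (cnt : PySem.Dict (String × String) Int) (suit : String)
    (hc : ∀ c : String, cnt.getD (suit, c) 0 = (l.count c : Int)) :
    PySem.Str.join "" (PySem.List.sorted (if l.length == 0 then l ++ ["-"] else l) pvKey) =
      pvPieceB cnt suit := by
  have e5 : ("AKQJx" : String).toList = ['A', 'K', 'Q', 'J', 'x'] := rfl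
  by_cases hl : l = []
  · subst hl
    have hL : PySem.Str.join ""
        (PySem.List.sorted (if ([] : List String).length == 0 then ([] : List String) ++ ["-"] else []) pvKey) = "-" := by
      decide
    rw [hL]
    simp only [pvPieceB, e5, List.map_cons, List.map_nil,
      show String.ofList ['A'] = "A" from rfl, show String.ofList ['K'] = "K" from rfl,
      show String.ofList ['Q'] = "Q" from rfl, show String.ofList ['J'] = "J" from rfl,
      show String.ofList ['x'] = "x" from rfl]
    rw [hc "A", hc "K", hc "Q", hc "J", hc "x"]
    decide
  · have h0 : (l.length == 0) = false := by simp [hl]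
    simp only [h0, Bool.false_eq_true, if_false]
    have h6 : ∀ y ∈ l, y ∈ (["A", "K", "Q", "J", "x", "-"] : List String) := by
      intro y hy; have := h y hy; simp only [List.mem_cons, List.not_mem_nil, or_false] at this ⊢
      tauto
    have hdash : l.count "-" = 0 := by
      refine List.count_eq_zero.mpr (fun hm => ?_)
      have := h _ hm
      revert this; decide
    rw [pvSortedCanon l h6, hdash]
    refine String.toList_inj.mp ?_
    have hRHS : (pvPieceB cnt suit).toList =
        List.replicate (l.count "A") 'A' ++ List.replicate (l.count "K") 'K' ++
        List.replicate (l.count "Q") 'Q' ++ List.replicate (l.count "J") 'J' ++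
        List.replicate (l.count "x") 'x' := by
      have hpc : (PySem.Str.join ""
          ((("AKQJx" : String).toList).map (fun ch =>
            String.ofList (List.replicate ((cnt.getD (suit, String.ofList [ch]) 0).toNat) ch)))).toList =
          List.replicate (l.count "A") 'A' ++ List.replicate (l.count "K") 'K' ++
          List.replicate (l.count "Q") 'Q' ++ List.replicate (l.count "J") 'J' ++
          List.replicate (l.count "x") 'x' := by
        simp only [e5, List.map_cons, List.map_nil,
          show String.ofList ['A'] = "A" from rfl, show String.ofList ['K'] = "K" from rfl,
          show String.ofList ['Q'] = "Q" from rfl, show String.ofList ['J'] = "J" from rfl,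
          show String.ofList ['x'] = "x" from rfl]
        rw [hc "A", hc "K", hc "Q", hc "J", hc "x"]
        rw [PySem.Str.toList_join, show ("" : String).toList = [] from rfl, pvJoinNilFlatten]
        simp [List.append_assoc]
      have hne : ¬ (PySem.Str.join ""
          ((("AKQJx" : String).toList).map (fun ch =>
            String.ofList (List.replicate ((cnt.getD (suit, String.ofList [ch]) 0).toNat) ch)))) = "" := by
        intro he
        have := congrArg String.toList he
        rw [hpc] at this
        have hlen := congrArg List.length this
        simp only [List.length_append, List.length_replicate, List.length_nil,
          show ("" : String).toList = [] from rfl] at hlen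
        have := pvLenEqSum l h
        have : l.length = 0 := by omega
        exact hl (List.length_eq_zero_iff.mp this)
      simp only [pvPieceB]
      rw [if_neg (by simpa using hne)]
      exact hpc
    rw [hRHS, pvJoinCanonToList]
    simp

-- ===== VERDICT (by name: the statement is the Claim_ definition above) =====
theorem pvJoin4 (p1 p2 p3 p4 : String) :
    p1 ++ " " ++ p2 ++ " " ++ p3 ++ " " ++ p4 = PySem.Str.join " " [p1, p2, p3, p4] := by
  refine String.toList_inj.mp ?_
  rw [PySem.Str.toList_join]
  rw [List.map_cons, List.map_cons, List.map_cons, List.map_cons, List.map_nil,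
    PySem.Chars.join_cons_cons, PySem.Chars.join_cons_cons, PySem.Chars.join_cons_cons]
  simp [String.toList_append, PySem.Chars.join, List.intercalate,
    show (" " : String).toList = [' '] from rfl]

theorem bridge_hand_shorthand_spec : Claim_equal_bridge_hand_shorthand := by
  intro hand _
  unfold Spec_bridge_hand_shorthand bridge_hand_shorthand bridge_hand_shorthand_alt
  rw [pvLoopA hand [] [] [] []]
  simp only [List.nil_append, List.foldl_cons, List.foldl_nil]
  have hkey : (fun x : String =>
      (PySem.Dict.ofList [("A", (0 : Int)), ("K", 1), ("Q", 2), ("J", 3), ("x", 4), ("-", 5)] :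
        PySem.Dict String Int).getD x 0) = pvKey := rfl
  rw [hkey]
  have hmem : ∀ suit : String, ∀ y ∈ pvSuitList hand suit,
      y ∈ (["A", "K", "Q", "J", "x"] : List String) := by
    intro suit y hy
    obtain ⟨p, -, rfl⟩ := List.mem_map.mp hy
    exact pvRCmem p.1
  have hc : ∀ suit ∈ (["spades", "hearts", "diamonds", "clubs"] : List String),
      ∀ c : String, (hand.foldl pvCountStepB PySem.Dict.empty).getD (suit, c) 0 =
        ((pvSuitList hand suit).count c : Int) := by
    intro suit hs c
    rw [pvCountDict, pvCountSuit hand suit c hs]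
  rw [pvPiece _ (hmem "spades") _ "spades" (hc "spades" (by simp)),
    pvPiece _ (hmem "hearts") _ "hearts" (hc "hearts" (by simp)),
    pvPiece _ (hmem "diamonds") _ "diamonds" (hc "diamonds" (by simp)),
    pvPiece _ (hmem "clubs") _ "clubs" (hc "clubs" (by simp))]
  exact pvJoin4 _ _ _ _
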